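-- pv_equiv track=rewrite | github.com/padipadou/search_engine | core_functions/others/alphabet_repartition.py | creation_alpha_dict
-- ===== SOURCE A (Python) =====
-- def creation_alpha_dict(depth):
--     alphabet_list = ["0", "1", "2", "3", "4", "5", "6", "7", "8", "9", "a", "b", "c", "d", "e", "f", "g", "h", "i", "j", "k", "l", "m", "n", "o", "p", "q", "r", "s", "t",
--                      "u", "v", "w", "x", "y", "z"]
--     alpha_dict = {}
--     for first_letter in alphabet_list:
--         if depth == 1:
--             key_ = first_letter
--             alpha_dict[key_] = 0
--         elif depth == 2:
--             for second_letter in alphabet_list: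
--                 key_ = first_letter + second_letter
--                 alpha_dict[key_] = 0
--         elif depth == 3:  # NOT USED FOR THE MOMENT
--             for second_letter in alphabet_list:
--                 for third_letter in alphabet_list:
--                     key_ = first_letter + second_letter + third_letter
--                     alpha_dict[key_] = 0
--
--     alpha_dict["0others"] = 0
--
--     return alpha_dict
-- ===== SOURCE B (Python) =====
-- def creation_alpha_dict(depth):
--     alphabet = "0123456789abcdefghijklmnopqrstuvwxyz"
--     if depth in (1, 2, 3):
--         keys = [""]
--         for _ in range(depth):
--             keys = [c + k for c in alphabet for k in keys]
--     else:
--         keys = []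
--     alpha_dict = {k: 0 for k in keys}
--     alpha_dict["0others"] = 0
--     return alpha_dict
-- ===== Notes on version B (the rewrite author's own statement) =====
-- stated objective: simpler
-- what changed: Replaces the three hand-written depth-specific nested-loop branches by one uniform pass: build the key list by repeated prefix-extension (depth rounds over one alphabet string) and fill the dict with a single comprehension, then add the sentinel.
import Mathlib
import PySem

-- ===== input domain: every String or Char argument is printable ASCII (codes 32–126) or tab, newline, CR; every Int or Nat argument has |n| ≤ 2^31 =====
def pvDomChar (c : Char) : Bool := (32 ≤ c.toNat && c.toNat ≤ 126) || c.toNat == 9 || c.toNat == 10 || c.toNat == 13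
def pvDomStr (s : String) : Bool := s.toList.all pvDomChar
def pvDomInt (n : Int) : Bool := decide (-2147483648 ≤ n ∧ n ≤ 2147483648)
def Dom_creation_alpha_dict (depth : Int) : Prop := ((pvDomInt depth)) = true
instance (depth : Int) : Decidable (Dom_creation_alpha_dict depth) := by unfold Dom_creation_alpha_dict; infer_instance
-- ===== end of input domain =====

-- B replaces A's three depth-specific nested-loop branches by one uniform pass: the key list is
-- built by `depth` rounds of prefix-extension over the alphabet and poured into the dict in one
-- comprehension (objective: simpler; same output, same asymptotic cost).

-- ===== PORT A =====
-- A's alphabet_list literal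
def pvAlphabetA : List String := ["0", "1", "2", "3", "4", "5", "6", "7", "8", "9", "a", "b", "c", "d", "e", "f", "g", "h", "i", "j", "k", "l", "m", "n", "o", "p", "q", "r", "s", "t", "u", "v", "w", "x", "y", "z"]

-- A's dict after the loop over alphabet_list and the final `alpha_dict["0others"] = 0`
def pvDictA (depth : Int) : PySem.Dict String Int :=
  (pvAlphabetA.foldl (fun (d : PySem.Dict String Int) first_letter =>
      if depth == 1 then d.insert first_letter 0
      else if depth == 2 then
        pvAlphabetA.foldl (fun d second_letter => d.insert (first_letter ++ second_letter) 0) d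
      else if depth == 3 then
        pvAlphabetA.foldl (fun d second_letter =>
          pvAlphabetA.foldl (fun d third_letter =>
            d.insert (first_letter ++ second_letter ++ third_letter) 0) d) d
      else d) PySem.Dict.empty).insert "0others" 0

def creation_alpha_dict (depth : Int) : List (String × Int) :=
  (pvDictA depth).items

-- ===== PORT B =====
-- B iterates over the characters of the alphabet string "0123...z"; each character is used as a
-- one-character string (Python `c + k`), so the alphabet is ported as the list of those strings.
def pvAlphabetB : List String := ["0", "1", "2", "3", "4", "5", "6", "7", "8", "9", "a", "b", "c", "d", "e", "f", "g", "h", "i", "j", "k", "l", "m", "n", "o", "p", "q", "r", "s", "t", "u", "v", "w", "x", "y", "z"]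

-- one round of `keys = [c + k for c in alphabet for k in keys]`
def pvExtend (keys : List String) : List String :=
  pvAlphabetB.flatMap (fun c => keys.map (fun k => c ++ k))

-- B's key list: depth rounds of prefix-extension when depth is 1, 2 or 3, else no keys
def pvKeysB (depth : Int) : List String :=
  if depth == 1 || depth == 2 || depth == 3 then
    (List.range depth.toNat).foldl (fun ks _ => pvExtend ks) [""]
  else []

-- B's dict: `{k: 0 for k in keys}` then `alpha_dict["0others"] = 0`
def pvDictB (depth : Int) : PySem.Dict String Int :=
  ((pvKeysB depth).foldl (fun (d : PySem.Dict String Int) k => d.insert k 0)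
    PySem.Dict.empty).insert "0others" 0

def creation_alpha_dict_alt (depth : Int) : List (String × Int) :=
  (pvDictB depth).items

-- ===== PRECONDITION & SPEC =====
def Spec_creation_alpha_dict (depth : Int) (out : List (String × Int)) : Prop := out = creation_alpha_dict_alt depth
instance (depth : Int) (out : List (String × Int)) : Decidable (Spec_creation_alpha_dict depth out) := by unfold Spec_creation_alpha_dict; infer_instance

-- ===== CLAIM (what is proved, stated in full; the proofs are below) =====
def Claim_equal_creation_alpha_dict : Prop := ∀ (depth : Int), Dom_creation_alpha_dict depth → Spec_creation_alpha_dict depth (creation_alpha_dict depth)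

-- ===== LEMMAS AND PROOFS =====

-- one prefix-extension round of [""] gives back the alphabet (c ++ "" = c on the 36 literals)
theorem pvExtend_singleton : pvExtend [""] = pvAlphabetB := by decide

-- the two ports spell out the same 36-letter alphabet
theorem pvAB : pvAlphabetA = pvAlphabetB := rfl

-- folding the dict-insert over one prefix-extension round = one more nested loop level
theorem pvFoldl_extend (keys : List String) (f : String → String)
    (d : PySem.Dict String Int) :
    ((pvExtend keys).map f).foldl (fun d k => d.insert k 0) d
      = pvAlphabetB.foldl (fun d c =>
          (keys.map (fun k => f (c ++ k))).foldl (fun d k => d.insert k 0) d) d := by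
  simp only [pvExtend, List.map_flatMap, List.foldl_flatMap, List.map_map, Function.comp_def]

theorem pv_hkeys1 : pvKeysB 1 = pvAlphabetB := by
  unfold pvKeysB
  rw [if_pos (by decide), show List.range (Int.toNat 1) = [0] from rfl,
    List.foldl_cons, List.foldl_nil, pvExtend_singleton]

theorem pv_hkeys2 : pvKeysB 2 = pvExtend pvAlphabetB := by
  unfold pvKeysB
  rw [if_pos (by decide), show List.range (Int.toNat 2) = [0, 1] from rfl,
    List.foldl_cons, List.foldl_cons, List.foldl_nil, pvExtend_singleton]

theorem pv_hkeys3 : pvKeysB 3 = pvExtend (pvExtend pvAlphabetB) := by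
  unfold pvKeysB
  rw [if_pos (by decide), show List.range (Int.toNat 3) = [0, 1, 2] from rfl,
    List.foldl_cons, List.foldl_cons, List.foldl_cons, List.foldl_nil, pvExtend_singleton]

theorem pv_case1 : pvDictA 1 = pvDictB 1 := by
  have hfun : (fun (d : PySem.Dict String Int) (first_letter : String) =>
        if ((1 : Int) == 1) = true then d.insert first_letter 0
        else if ((1 : Int) == 2) = true then
          pvAlphabetA.foldl (fun d second_letter => d.insert (first_letter ++ second_letter) 0) d
        else if ((1 : Int) == 3) = true then
          pvAlphabetA.foldl (fun d second_letter =>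
            pvAlphabetA.foldl (fun d third_letter =>
              d.insert (first_letter ++ second_letter ++ third_letter) 0) d) d
        else d)
      = (fun (d : PySem.Dict String Int) (k : String) => d.insert k 0) := by
    funext d k
    rw [if_pos (by decide)]
  calc pvDictA 1
      = (pvAlphabetA.foldl (fun (d : PySem.Dict String Int) (k : String) => d.insert k 0)
          PySem.Dict.empty).insert "0others" 0 :=
        congrArg (fun (F : PySem.Dict String Int → String → PySem.Dict String Int) =>
          (pvAlphabetA.foldl F PySem.Dict.empty).insert "0others" 0) hfun
    _ = (pvAlphabetB.foldl (fun (d : PySem.Dict String Int) (k : String) => d.insert k 0)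
          PySem.Dict.empty).insert "0others" 0 :=
        congrArg (fun (L : List String) =>
          (L.foldl (fun (d : PySem.Dict String Int) (k : String) => d.insert k 0)
            PySem.Dict.empty).insert "0others" 0) pvAB
    _ = pvDictB 1 :=
        (congrArg (fun (l : List String) =>
          (l.foldl (fun (d : PySem.Dict String Int) (k : String) => d.insert k 0)
            PySem.Dict.empty).insert "0others" 0) pv_hkeys1).symm

theorem pv_case2 : pvDictA 2 = pvDictB 2 := by
  have hfun : (fun (d : PySem.Dict String Int) (first_letter : String) =>
        if ((2 : Int) == 1) = true then d.insert first_letter 0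
        else if ((2 : Int) == 2) = true then
          pvAlphabetA.foldl (fun d second_letter => d.insert (first_letter ++ second_letter) 0) d
        else if ((2 : Int) == 3) = true then
          pvAlphabetA.foldl (fun d second_letter =>
            pvAlphabetA.foldl (fun d third_letter =>
              d.insert (first_letter ++ second_letter ++ third_letter) 0) d) d
        else d)
      = (fun (d : PySem.Dict String Int) (c : String) =>
          pvAlphabetB.foldl (fun d s => d.insert (c ++ s) 0) d) := by
    funext d c
    rw [if_neg (by decide), if_pos (by decide)]
    rfl
  have h2 : (pvExtend pvAlphabetB).foldl (fun d k => d.insert k 0)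
        (PySem.Dict.empty : PySem.Dict String Int)
      = pvAlphabetB.foldl (fun d c =>
          pvAlphabetB.foldl (fun d s => d.insert (c ++ s) 0) d) PySem.Dict.empty := by
    have hb := pvFoldl_extend pvAlphabetB id PySem.Dict.empty
    simp only [List.map_id, id_eq, List.foldl_map] at hb
    exact hb
  calc pvDictA 2
      = (pvAlphabetA.foldl (fun (d : PySem.Dict String Int) (c : String) =>
            pvAlphabetB.foldl (fun d s => d.insert (c ++ s) 0) d)
          PySem.Dict.empty).insert "0others" 0 :=
        congrArg (fun (F : PySem.Dict String Int → String → PySem.Dict String Int) =>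
          (pvAlphabetA.foldl F PySem.Dict.empty).insert "0others" 0) hfun
    _ = (pvAlphabetB.foldl (fun (d : PySem.Dict String Int) (c : String) =>
            pvAlphabetB.foldl (fun d s => d.insert (c ++ s) 0) d)
          PySem.Dict.empty).insert "0others" 0 :=
        congrArg (fun (L : List String) =>
          (L.foldl (fun (d : PySem.Dict String Int) (c : String) =>
            pvAlphabetB.foldl (fun d s => d.insert (c ++ s) 0) d)
            PySem.Dict.empty).insert "0others" 0) pvAB
    _ = ((pvExtend pvAlphabetB).foldl (fun (d : PySem.Dict String Int) (k : String) =>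
            d.insert k 0) PySem.Dict.empty).insert "0others" 0 :=
        congrArg (fun (dct : PySem.Dict String Int) => dct.insert "0others" 0) h2.symm
    _ = pvDictB 2 :=
        (congrArg (fun (l : List String) =>
          (l.foldl (fun (d : PySem.Dict String Int) (k : String) => d.insert k 0)
            PySem.Dict.empty).insert "0others" 0) pv_hkeys2).symm

theorem pv_case3 : pvDictA 3 = pvDictB 3 := by
  have hfun : (fun (d : PySem.Dict String Int) (first_letter : String) =>
        if ((3 : Int) == 1) = true then d.insert first_letter 0
        else if ((3 : Int) == 2) = true then
          pvAlphabetA.foldl (fun d second_letter => d.insert (first_letter ++ second_letter) 0) d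
        else if ((3 : Int) == 3) = true then
          pvAlphabetA.foldl (fun d second_letter =>
            pvAlphabetA.foldl (fun d third_letter =>
              d.insert (first_letter ++ second_letter ++ third_letter) 0) d) d
        else d)
      = (fun (d : PySem.Dict String Int) (c : String) =>
          pvAlphabetB.foldl (fun d s =>
            pvAlphabetB.foldl (fun d t => d.insert (c ++ s ++ t) 0) d) d) := by
    funext d c
    rw [if_neg (by decide), if_neg (by decide), if_pos (by decide)]
    rfl
  have hinner : ∀ (c : String) (d : PySem.Dict String Int),
      ((pvExtend pvAlphabetB).map (fun k => c ++ k)).foldl (fun d k => d.insert k 0) d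
        = pvAlphabetB.foldl (fun d s =>
            pvAlphabetB.foldl (fun d t => d.insert (c ++ s ++ t) 0) d) d := by
    intro c d
    rw [pvFoldl_extend pvAlphabetB (fun k => c ++ k) d]
    simp only [List.foldl_map, String.append_assoc]
  have h3 : (pvExtend (pvExtend pvAlphabetB)).foldl (fun d k => d.insert k 0)
        (PySem.Dict.empty : PySem.Dict String Int)
      = pvAlphabetB.foldl (fun d c =>
          pvAlphabetB.foldl (fun d s =>
            pvAlphabetB.foldl (fun d t => d.insert (c ++ s ++ t) 0) d) d) PySem.Dict.empty := by
    have hb := pvFoldl_extend (pvExtend pvAlphabetB) id PySem.Dict.empty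
    simp only [List.map_id, id_eq] at hb
    simp only [hinner] at hb
    exact hb
  calc pvDictA 3
      = (pvAlphabetA.foldl (fun (d : PySem.Dict String Int) (c : String) =>
            pvAlphabetB.foldl (fun d s =>
              pvAlphabetB.foldl (fun d t => d.insert (c ++ s ++ t) 0) d) d)
          PySem.Dict.empty).insert "0others" 0 :=
        congrArg (fun (F : PySem.Dict String Int → String → PySem.Dict String Int) =>
          (pvAlphabetA.foldl F PySem.Dict.empty).insert "0others" 0) hfun
    _ = (pvAlphabetB.foldl (fun (d : PySem.Dict String Int) (c : String) =>
            pvAlphabetB.foldl (fun d s =>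
              pvAlphabetB.foldl (fun d t => d.insert (c ++ s ++ t) 0) d) d)
          PySem.Dict.empty).insert "0others" 0 :=
        congrArg (fun (L : List String) =>
          (L.foldl (fun (d : PySem.Dict String Int) (c : String) =>
            pvAlphabetB.foldl (fun d s =>
              pvAlphabetB.foldl (fun d t => d.insert (c ++ s ++ t) 0) d) d)
            PySem.Dict.empty).insert "0others" 0) pvAB
    _ = ((pvExtend (pvExtend pvAlphabetB)).foldl (fun (d : PySem.Dict String Int) (k : String) =>
            d.insert k 0) PySem.Dict.empty).insert "0others" 0 :=
        congrArg (fun (dct : PySem.Dict String Int) => dct.insert "0others" 0) h3.symm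
    _ = pvDictB 3 :=
        (congrArg (fun (l : List String) =>
          (l.foldl (fun (d : PySem.Dict String Int) (k : String) => d.insert k 0)
            PySem.Dict.empty).insert "0others" 0) pv_hkeys3).symm

theorem pv_case_other (depth : Int) (h1 : depth ≠ 1) (h2 : depth ≠ 2) (h3 : depth ≠ 3) :
    pvDictA depth = pvDictB depth := by
  have hfun : (fun (d : PySem.Dict String Int) (first_letter : String) =>
        if (depth == 1) = true then d.insert first_letter 0
        else if (depth == 2) = true then
          pvAlphabetA.foldl (fun d second_letter => d.insert (first_letter ++ second_letter) 0) d
        else if (depth == 3) = true then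
          pvAlphabetA.foldl (fun d second_letter =>
            pvAlphabetA.foldl (fun d third_letter =>
              d.insert (first_letter ++ second_letter ++ third_letter) 0) d) d
        else d)
      = (fun (d : PySem.Dict String Int) (_ : String) => d) := by
    funext d c
    rw [if_neg (by simp [h1]), if_neg (by simp [h2]), if_neg (by simp [h3])]
  have hkeys : pvKeysB depth = [] := by
    unfold pvKeysB
    exact if_neg (by simp [h1, h2, h3])
  calc pvDictA depth
      = (pvAlphabetA.foldl (fun (d : PySem.Dict String Int) (_ : String) => d)
          PySem.Dict.empty).insert "0others" 0 :=
        congrArg (fun (F : PySem.Dict String Int → String → PySem.Dict String Int) =>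
          (pvAlphabetA.foldl F PySem.Dict.empty).insert "0others" 0) hfun
    _ = (PySem.Dict.empty : PySem.Dict String Int).insert "0others" 0 :=
        congrArg (fun (dct : PySem.Dict String Int) => dct.insert "0others" 0)
          (List.foldl_fixed pvAlphabetA)
    _ = pvDictB depth :=
        (congrArg (fun (l : List String) =>
          (l.foldl (fun (d : PySem.Dict String Int) (k : String) => d.insert k 0)
            PySem.Dict.empty).insert "0others" 0) hkeys).symm

theorem pv_dict_eq (depth : Int) : pvDictA depth = pvDictB depth := by
  by_cases h1 : depth = 1
  · subst h1; exact pv_case1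
  by_cases h2 : depth = 2
  · subst h2; exact pv_case2
  by_cases h3 : depth = 3
  · subst h3; exact pv_case3
  exact pv_case_other depth h1 h2 h3

-- ===== VERDICT (by name: the statement is the Claim_ definition above) =====
theorem creation_alpha_dict_spec : Claim_equal_creation_alpha_dict := by
  intro depth _
  unfold Spec_creation_alpha_dict
  exact congrArg PySem.Dict.items (pv_dict_eq depth)
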